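-- pv_equiv track=rewrite | github.com/chenye95/LeetCode_Progress | FB_1_Photo.py | get_artistic_photograph_count
-- ===== SOURCE A (Python) =====
-- def get_artistic_photograph_count(N: int, C: str, X: int, Y: int) -> int:
--     # get acceptable B position for every available A position in PAB combo
--     B_forward_count = [0] * N
--     # get acceptable P position for every available A position in BAP combo
--     P_forward_count = [0] * N
--     for i, c_i in enumerate(C):
--         if c_i == 'A':
--             B_forward_count[i] = sum([c_i == 'B' for c_i in C[i + X: i + Y + 1]])
--             P_forward_count[i] = sum([c_i == 'P' for c_i in C[i + X: i + Y + 1]])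
--
--     position_count = 0
--     for i, c_i in enumerate(C):
--         if c_i == 'P':
--             position_count += sum(B_forward_count[i + X: i + Y + 1])
--         if c_i == 'B':
--             position_count += sum(P_forward_count[i + X: i + Y + 1])
--
--     return position_count
-- ===== SOURCE B (Python) =====
-- def _slice_sum(pref, n, a, b):
--     # sum(xs[a:b]) via prefix sums, where pref[k] = sum(xs[:k]) and n = len(xs):
--     # normalize a, b exactly as Python slicing does, then subtract prefix sums
--     if a < 0:
--         a += n
--     a = min(max(a, 0), n)
--     if b < 0:
--         b += n
--     b = min(max(b, 0), n)
--     return pref[b] - pref[a] if a < b else 0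
--
--
-- def get_artistic_photograph_count(N: int, C: str, X: int, Y: int) -> int:
--     n = len(C)
--     # prefix counts of 'B' and of 'P' over C
--     pref_b = [0]
--     tb = 0
--     for c in C:
--         tb += 1 if c == 'B' else 0
--         pref_b.append(tb)
--     pref_p = [0]
--     tp = 0
--     for c in C:
--         tp += 1 if c == 'P' else 0
--         pref_p.append(tp)
--     # forward counts per 'A' position via prefix-sum window queries
--     bf = [0] * N
--     pf = [0] * N
--     for i, c in enumerate(C):
--         if c == 'A':
--             bf[i] = _slice_sum(pref_b, n, i + X, i + Y + 1)
--             pf[i] = _slice_sum(pref_p, n, i + X, i + Y + 1)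
--     # prefix sums over the forward-count arrays
--     m = len(bf)
--     pref_bf = [0]
--     sb = 0
--     for v in bf:
--         sb += v
--         pref_bf.append(sb)
--     pref_pf = [0]
--     sp = 0
--     for v in pf:
--         sp += v
--         pref_pf.append(sp)
--     total = 0
--     for i, c in enumerate(C):
--         if c == 'P':
--             total += _slice_sum(pref_bf, m, i + X, i + Y + 1)
--         if c == 'B':
--             total += _slice_sum(pref_pf, m, i + X, i + Y + 1)
--     return total
-- ===== Notes on version B (the rewrite author's own statement) =====
-- stated objective: alternative
-- what changed: Replaces A's repeated window re-summations (a slice of C re-counted per 'A', a slice of the forward-count arrays re-summed per 'P'/'B') with precomputed prefix-sum arrays queried once per position; it trades A's repeated slicing for four extra linear prefix passes.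
import Mathlib
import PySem

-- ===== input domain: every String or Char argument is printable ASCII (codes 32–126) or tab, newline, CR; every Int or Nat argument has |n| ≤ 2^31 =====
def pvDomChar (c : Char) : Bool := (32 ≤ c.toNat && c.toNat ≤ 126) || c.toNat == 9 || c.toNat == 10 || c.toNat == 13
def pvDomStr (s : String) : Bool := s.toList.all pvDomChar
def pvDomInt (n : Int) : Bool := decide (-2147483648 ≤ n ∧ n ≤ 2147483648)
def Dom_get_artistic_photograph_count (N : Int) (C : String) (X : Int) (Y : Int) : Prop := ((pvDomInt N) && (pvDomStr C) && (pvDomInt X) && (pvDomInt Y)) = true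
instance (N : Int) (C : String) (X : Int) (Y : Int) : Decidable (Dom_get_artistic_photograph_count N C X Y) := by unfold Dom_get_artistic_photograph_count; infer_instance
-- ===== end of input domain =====

-- B replaces A's per-position window re-summations with precomputed prefix-sum arrays queried per position (objective: alternative).


-- ===== PORT A =====
-- Literal transliteration of A.  `B_forward_count[i] = v` is ported as `List.set i.toNat v`:
-- exact whenever i < N (enumerate indices are ≥ 0); where Python would raise IndexError
-- ('A' at an index ≥ N) is excluded by Pre_ below.
def get_artistic_photograph_count (N : Int) (C : String) (X : Int) (Y : Int) : Int :=
  let cs := C.toList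
  -- first loop: fill B_forward_count / P_forward_count, summing a slice of C per 'A'
  let fp := (PySem.List.enumerate cs 0).foldl
    (fun (st : List Int × List Int) ic =>
      if ic.2 = 'A' then
        (st.1.set ic.1.toNat (((PySem.List.slice cs (some (ic.1 + X)) (some (ic.1 + Y + 1))).map
            (fun c => if c = 'B' then (1 : Int) else 0)).sum),
         st.2.set ic.1.toNat (((PySem.List.slice cs (some (ic.1 + X)) (some (ic.1 + Y + 1))).map
            (fun c => if c = 'P' then (1 : Int) else 0)).sum))
      else st)
    (List.replicate N.toNat 0, List.replicate N.toNat 0)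
  -- second loop: position_count, summing a slice of the forward-count array per 'P' / 'B'
  (PySem.List.enumerate cs 0).foldl
    (fun (acc : Int) ic =>
      let acc1 := if ic.2 = 'P' then acc + (PySem.List.slice fp.1 (some (ic.1 + X)) (some (ic.1 + Y + 1))).sum else acc
      if ic.2 = 'B' then acc1 + (PySem.List.slice fp.2 (some (ic.1 + X)) (some (ic.1 + Y + 1))).sum else acc1)
    0

-- ===== PORT B =====
-- _slice_sum of Source B: sum(xs[a:b]) via prefix sums; pref[k] read with pyGetD (index always in range: 0 ≤ k ≤ n < len pref)
def pvSliceSum (pref : List Int) (n a b : Int) : Int :=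
  let a2 := if a < 0 then a + n else a
  let a3 := min (max a2 0) n
  let b2 := if b < 0 then b + n else b
  let b3 := min (max b2 0) n
  if a3 < b3 then PySem.List.pyGetD pref b3 0 - PySem.List.pyGetD pref a3 0 else 0

def get_artistic_photograph_count_alt (N : Int) (C : String) (X : Int) (Y : Int) : Int :=
  let cs := C.toList
  let n : Int := cs.length
  -- prefix counts of 'B' and of 'P' over C
  -- Source B appends the running total to the prefix list each step; ported with a cons
  -- accumulator reversed at the end (the same list values, matching Python's list.append)
  let prB := cs.foldl (fun (st : List Int × Int) c =>
      ((st.2 + (if c = 'B' then (1 : Int) else 0)) :: st.1, st.2 + (if c = 'B' then (1 : Int) else 0))) ([0], 0)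
  let prP := cs.foldl (fun (st : List Int × Int) c =>
      ((st.2 + (if c = 'P' then (1 : Int) else 0)) :: st.1, st.2 + (if c = 'P' then (1 : Int) else 0))) ([0], 0)
  -- forward counts per 'A' position via prefix-sum window queries (same set/IndexError convention as port A)
  let fp := (PySem.List.enumerate cs 0).foldl
    (fun (st : List Int × List Int) ic =>
      if ic.2 = 'A' then
        (st.1.set ic.1.toNat (pvSliceSum prB.1.reverse n (ic.1 + X) (ic.1 + Y + 1)),
         st.2.set ic.1.toNat (pvSliceSum prP.1.reverse n (ic.1 + X) (ic.1 + Y + 1)))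
      else st)
    (List.replicate N.toNat 0, List.replicate N.toNat 0)
  let m : Int := fp.1.length
  -- prefix sums over the forward-count arrays
  let prBF := fp.1.foldl (fun (st : List Int × Int) v => ((st.2 + v) :: st.1, st.2 + v)) ([0], 0)
  let prPF := fp.2.foldl (fun (st : List Int × Int) v => ((st.2 + v) :: st.1, st.2 + v)) ([0], 0)
  (PySem.List.enumerate cs 0).foldl
    (fun (acc : Int) ic =>
      let acc1 := if ic.2 = 'P' then acc + pvSliceSum prBF.1.reverse m (ic.1 + X) (ic.1 + Y + 1) else acc
      if ic.2 = 'B' then acc1 + pvSliceSum prPF.1.reverse m (ic.1 + X) (ic.1 + Y + 1) else acc1)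
    0

-- ===== PRECONDITION & SPEC =====
-- Pre_ excludes exactly the inputs on which Python A raises IndexError: an 'A' in C at an
-- index ≥ N (the forward-count arrays have length N).
def Pre_get_artistic_photograph_count (N : Int) (C : String) (X : Int) (Y : Int) : Prop :=
  ((C.toList.drop N.toNat).all (fun c => c != 'A')) = true
instance (N : Int) (C : String) (X : Int) (Y : Int) : Decidable (Pre_get_artistic_photograph_count N C X Y) := by unfold Pre_get_artistic_photograph_count; infer_instance
def pvWitness_get_artistic_photograph_count : Int × String × Int × Int := (3, "PAB", 1, 2)

def Spec_get_artistic_photograph_count (N : Int) (C : String) (X : Int) (Y : Int) (out : Int) : Prop := out = get_artistic_photograph_count_alt N C X Y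
instance (N : Int) (C : String) (X : Int) (Y : Int) (out : Int) : Decidable (Spec_get_artistic_photograph_count N C X Y out) := by unfold Spec_get_artistic_photograph_count; infer_instance

-- ===== CLAIM (what is proved, stated in full; the proofs are below) =====
def Claim_equal_get_artistic_photograph_count : Prop := ∀ (N : Int) (C : String) (X : Int) (Y : Int), Dom_get_artistic_photograph_count N C X Y → Pre_get_artistic_photograph_count N C X Y → Spec_get_artistic_photograph_count N C X Y (get_artistic_photograph_count N C X Y)

-- ===== LEMMAS AND PROOFS =====

-- spec of a Python prefix-sum list: pvPrefix xs = [sum(xs[:k]) for k in range(len(xs)+1)]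
def pvPrefix (xs : List Int) : List Int := (List.range (xs.length + 1)).map (fun k => (xs.take k).sum)

theorem pvPrefix_concat (l : List Int) (x : Int) : pvPrefix (l ++ [x]) = pvPrefix l ++ [l.sum + x] := by
  unfold pvPrefix
  rw [List.length_append, List.length_singleton, List.range_succ, List.map_append]
  congr 1
  · apply List.map_congr_left
    intro k hk
    rw [List.mem_range] at hk
    rw [List.take_append_of_le_length (by omega)]
  · simp

-- the Source B prefix-building loop computes pvPrefix of the mapped list
theorem pvBuild {α : Type} (f : α → Int) (xs : List α) :
    xs.foldl (fun (st : List Int × Int) c => ((st.2 + f c) :: st.1, st.2 + f c)) ([0], 0)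
      = ((pvPrefix (xs.map f)).reverse, (xs.map f).sum) := by
  induction xs using List.reverseRecOn with
  | nil => simp [pvPrefix]
  | append_singleton l x ih =>
      rw [List.foldl_append, ih]
      simp [pvPrefix_concat]

theorem pvClamp_cast (n : Nat) (a : Int) :
    min (max (if a < 0 then a + (n : Int) else a) 0) (n : Int) = ((PySem.List.clampIdx n a : Nat) : Int) := by
  unfold PySem.List.clampIdx
  split_ifs <;> omega

theorem pvPrefix_get (xs : List Int) (k : Nat) (hk : k ≤ xs.length) :
    PySem.List.pyGetD (pvPrefix xs) (k : Int) 0 = (xs.take k).sum := by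
  rw [PySem.List.pyGetD_natCast]
  unfold pvPrefix
  rw [List.getD_eq_getElem?_getD, List.getElem?_map, List.getElem?_range (by omega)]
  rfl

-- the central fact: _slice_sum over pvPrefix xs is sum(xs[a:b])
theorem pvSliceSum_eq (xs : List Int) (a b : Int) :
    pvSliceSum (pvPrefix xs) (xs.length : Int) a b = (PySem.List.slice xs (some a) (some b)).sum := by
  show (if min (max (if a < 0 then a + (xs.length:Int) else a) 0) (xs.length:Int) < min (max (if b < 0 then b + (xs.length:Int) else b) 0) (xs.length:Int) then _ - _ else 0) = _
  rw [pvClamp_cast, pvClamp_cast]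
  show _ = (List.take (PySem.List.clampIdx xs.length b - PySem.List.clampIdx xs.length a) (List.drop (PySem.List.clampIdx xs.length a) xs)).sum
  have ha : PySem.List.clampIdx xs.length a ≤ xs.length := PySem.List.clampIdx_le ..
  have hb : PySem.List.clampIdx xs.length b ≤ xs.length := PySem.List.clampIdx_le ..
  set a' := PySem.List.clampIdx xs.length a with h1
  set b' := PySem.List.clampIdx xs.length b with h2
  by_cases h : a' < b'
  · rw [if_pos (by exact_mod_cast h), pvPrefix_get xs b' hb, pvPrefix_get xs a' ha]
    have := List.sum_take_add_sum_drop (xs.take b') a'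
    rw [List.take_take, min_eq_left (le_of_lt h)] at this
    rw [List.drop_take] at this
    omega
  · rw [if_neg (by exact_mod_cast h)]
    have : b' - a' = 0 := by omega
    rw [this]
    simp

theorem pvSlice_map {α : Type} (f : α → Int) (xs : List α) (a b : Int) :
    PySem.List.slice (xs.map f) (some a) (some b) = (PySem.List.slice xs (some a) (some b)).map f := by
  unfold PySem.List.slice
  simp [List.map_drop, List.map_take]

theorem pvBuildId (xs : List Int) :
    List.foldl (fun (st : List Int × Int) v => ((st.2 + v) :: st.1, st.2 + v)) ([0], 0) xs
      = ((pvPrefix xs).reverse, xs.sum) := by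
  have h := pvBuild (fun v : Int => v) xs
  simpa using h

theorem pvFpLen (l : List (Int × Char)) (g1 g2 : Int × Char → Int) (st : List Int × List Int) :
    (List.foldl (fun (st : List Int × List Int) ic =>
        if ic.2 = 'A' then (st.1.set ic.1.toNat (g1 ic), st.2.set ic.1.toNat (g2 ic)) else st) st l).1.length
        = st.1.length
    ∧ (List.foldl (fun (st : List Int × List Int) ic =>
        if ic.2 = 'A' then (st.1.set ic.1.toNat (g1 ic), st.2.set ic.1.toNat (g2 ic)) else st) st l).2.length
        = st.2.length := by
  induction l generalizing st with
  | nil => exact ⟨rfl, rfl⟩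
  | cons x xs ih =>
      simp only [List.foldl_cons]
      refine ⟨(ih _).1.trans ?_, (ih _).2.trans ?_⟩ <;> by_cases h : x.2 = 'A' <;> simp [h]

theorem pvStage2 (l : List (Int × Char)) (bf pf : List Int) (hl : pf.length = bf.length) (X Y : Int) :
    List.foldl (fun (acc : Int) ic =>
      let acc1 := if ic.2 = 'P' then acc + pvSliceSum (List.foldl (fun (st : List Int × Int) v => ((st.2 + v) :: st.1, st.2 + v)) ([0], 0) bf).1.reverse ((bf.length : Nat) : Int) (ic.1 + X) (ic.1 + Y + 1) else acc
      if ic.2 = 'B' then acc1 + pvSliceSum (List.foldl (fun (st : List Int × Int) v => ((st.2 + v) :: st.1, st.2 + v)) ([0], 0) pf).1.reverse ((bf.length : Nat) : Int) (ic.1 + X) (ic.1 + Y + 1) else acc1) 0 l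
    = List.foldl (fun (acc : Int) ic =>
      let acc1 := if ic.2 = 'P' then acc + (PySem.List.slice bf (some (ic.1 + X)) (some (ic.1 + Y + 1))).sum else acc
      if ic.2 = 'B' then acc1 + (PySem.List.slice pf (some (ic.1 + X)) (some (ic.1 + Y + 1))).sum else acc1) 0 l := by
  have hstep : (fun (acc : Int) (ic : Int × Char) =>
      let acc1 := if ic.2 = 'P' then acc + pvSliceSum (List.foldl (fun (st : List Int × Int) v => ((st.2 + v) :: st.1, st.2 + v)) ([0], 0) bf).1.reverse ((bf.length : Nat) : Int) (ic.1 + X) (ic.1 + Y + 1) else acc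
      if ic.2 = 'B' then acc1 + pvSliceSum (List.foldl (fun (st : List Int × Int) v => ((st.2 + v) :: st.1, st.2 + v)) ([0], 0) pf).1.reverse ((bf.length : Nat) : Int) (ic.1 + X) (ic.1 + Y + 1) else acc1)
      = (fun (acc : Int) (ic : Int × Char) =>
      let acc1 := if ic.2 = 'P' then acc + (PySem.List.slice bf (some (ic.1 + X)) (some (ic.1 + Y + 1))).sum else acc
      if ic.2 = 'B' then acc1 + (PySem.List.slice pf (some (ic.1 + X)) (some (ic.1 + Y + 1))).sum else acc1) := by
    funext acc ic
    rw [pvBuildId bf, pvBuildId pf]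
    simp only [List.reverse_reverse]
    show (if ic.2 = 'B' then (if ic.2 = 'P' then acc + pvSliceSum (pvPrefix bf) ((bf.length : Nat) : Int) (ic.1 + X) (ic.1 + Y + 1) else acc) + pvSliceSum (pvPrefix pf) ((bf.length : Nat) : Int) (ic.1 + X) (ic.1 + Y + 1) else (if ic.2 = 'P' then acc + pvSliceSum (pvPrefix bf) ((bf.length : Nat) : Int) (ic.1 + X) (ic.1 + Y + 1) else acc)) = _
    rw [← hl, pvSliceSum_eq pf]
    rw [show ((pf.length : Nat) : Int) = ((bf.length : Nat) : Int) from by rw [hl], pvSliceSum_eq bf]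
  rw [hstep]

theorem pvMain (N : Int) (C : String) (X : Int) (Y : Int) :
    get_artistic_photograph_count N C X Y = get_artistic_photograph_count_alt N C X Y := by
  simp only [get_artistic_photograph_count, get_artistic_photograph_count_alt]
  rw [pvBuild (fun c => if c = 'B' then (1:Int) else 0) C.toList,
      pvBuild (fun c => if c = 'P' then (1:Int) else 0) C.toList]
  simp only [List.reverse_reverse]
  have key : ∀ (f : Char → Int) (a b : Int),
      pvSliceSum (pvPrefix (List.map f C.toList)) ((C.toList.length : Nat) : Int) a b
        = (List.map f (PySem.List.slice C.toList (some a) (some b))).sum := by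
    intro f a b
    have h := pvSliceSum_eq (C.toList.map f) a b
    rw [List.length_map] at h
    rw [h, pvSlice_map]
  simp only [key]
  refine (pvStage2 _ _ _ ?_ X Y).symm
  have h := pvFpLen (PySem.List.enumerate C.toList 0)
    (fun ic => (List.map (fun c => if c = 'B' then (1:Int) else 0) (PySem.List.slice C.toList (some (ic.1 + X)) (some (ic.1 + Y + 1)))).sum)
    (fun ic => (List.map (fun c => if c = 'P' then (1:Int) else 0) (PySem.List.slice C.toList (some (ic.1 + X)) (some (ic.1 + Y + 1)))).sum)
    (List.replicate N.toNat 0, List.replicate N.toNat 0)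
  exact h.2.trans h.1.symm

-- ===== VERDICT (by name: the statement is the Claim_ definition above) =====
theorem get_artistic_photograph_count_spec : Claim_equal_get_artistic_photograph_count := by
  intro N C X Y _ _
  unfold Spec_get_artistic_photograph_count
  exact pvMain N C X Y
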